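-- pv_equiv track=rewrite | github.com/pollination/sample-apps | energy-simulation-report/report.py | replace_links_in_report
-- ===== SOURCE A (Python) =====
-- def replace_links_in_report(report: str):
--
--     link_replace_args = [
--         ('http://cdnjs.cloudflare.com/ajax/libs/twitter-bootstrap/3.2.0/css/bootstrap.min.css',
--          './static/css/bootstrap.min.css'),
--         ('http://cdnjs.cloudflare.com/ajax/libs/jquery/2.0.3/jquery.min.js',
--          './static/js/jquery.min.js'),
--         ('http://maxcdn.bootstrapcdn.com/bootstrap/3.2.0/js/bootstrap.min.js',
--          './static/js/bootstrap.min.js'),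
--         ('http://cdnjs.cloudflare.com/ajax/libs/d3/3.4.8/d3.min.js',
--          './static/js/d3.min.js'),
--         ('http://dimplejs.org/dist/dimple.v2.1.2.min.js',
--          './static/js/dimple.min.js')
--     ]
--
--     for args in link_replace_args:
--         report = report.replace(*args)
--     return report
-- ===== SOURCE B (Python) =====
-- # CDN URL -> local path, in the priority order of the report template
-- _LOCAL = {
--     'http://cdnjs.cloudflare.com/ajax/libs/twitter-bootstrap/3.2.0/css/bootstrap.min.css':
--         './static/css/bootstrap.min.css',
--     'http://cdnjs.cloudflare.com/ajax/libs/jquery/2.0.3/jquery.min.js':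
--         './static/js/jquery.min.js',
--     'http://maxcdn.bootstrapcdn.com/bootstrap/3.2.0/js/bootstrap.min.js':
--         './static/js/bootstrap.min.js',
--     'http://cdnjs.cloudflare.com/ajax/libs/d3/3.4.8/d3.min.js':
--         './static/js/d3.min.js',
--     'http://dimplejs.org/dist/dimple.v2.1.2.min.js':
--         './static/js/dimple.min.js',
-- }
--
--
-- def replace_links_in_report(report: str):
--     # one left-to-right scan: at each position emit either the local path for a
--     # CDN URL that starts here (first table entry wins) or the character itself
--     out = []
--     i = 0
--     n = len(report)
--     while i < n:
--         for url, local in _LOCAL.items():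
--             if report.startswith(url, i):
--                 out.append(local)
--                 i += len(url)
--                 break
--         else:
--             out.append(report[i])
--             i += 1
--     return ''.join(out)
-- ===== Notes on version B (the rewrite author's own statement) =====
-- stated objective: alternative
-- what changed: Replaces five sequential full-string str.replace passes by a single left-to-right scan that, at each position, consults a fixed URL->path table (first match wins) and emits either the local path or the current character.
import Mathlib
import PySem

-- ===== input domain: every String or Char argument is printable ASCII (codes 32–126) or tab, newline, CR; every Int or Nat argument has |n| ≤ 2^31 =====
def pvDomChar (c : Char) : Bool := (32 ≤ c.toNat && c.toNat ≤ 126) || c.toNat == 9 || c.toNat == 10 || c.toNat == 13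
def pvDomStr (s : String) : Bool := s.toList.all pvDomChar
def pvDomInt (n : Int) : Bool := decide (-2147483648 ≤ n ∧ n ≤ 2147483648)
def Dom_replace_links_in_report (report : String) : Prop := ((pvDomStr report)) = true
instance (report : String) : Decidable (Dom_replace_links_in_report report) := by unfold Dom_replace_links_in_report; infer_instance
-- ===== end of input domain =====

-- B replaces A's five sequential full-string replace passes by one left-to-right scan
-- driven by the URL→path table (first match wins); alternative algorithm, same values.

-- ===== PORT A =====
def pvLinks : List (String × String) := [
  ("http://cdnjs.cloudflare.com/ajax/libs/twitter-bootstrap/3.2.0/css/bootstrap.min.css",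
   "./static/css/bootstrap.min.css"),
  ("http://cdnjs.cloudflare.com/ajax/libs/jquery/2.0.3/jquery.min.js",
   "./static/js/jquery.min.js"),
  ("http://maxcdn.bootstrapcdn.com/bootstrap/3.2.0/js/bootstrap.min.js",
   "./static/js/bootstrap.min.js"),
  ("http://cdnjs.cloudflare.com/ajax/libs/d3/3.4.8/d3.min.js",
   "./static/js/d3.min.js"),
  ("http://dimplejs.org/dist/dimple.v2.1.2.min.js",
   "./static/js/dimple.min.js")]

def replace_links_in_report (report : String) : String :=
  pvLinks.foldl (fun acc pr => PySem.Str.replace acc pr.1 pr.2) report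

-- ===== PORT B =====
-- (the table of Source B's _LOCAL dict: same pairs, association list per the type convention)
def pvTableB : List (List Char × List Char) :=
  pvLinks.map (fun pr => (pr.1.toList, pr.2.toList))

theorem pvTableB_pat_pos : ∀ pr ∈ pvTableB, 0 < pr.1.length := by decide

-- the while-loop of Source B: at each position try the table entries in order (for/else)
def pvScanGo : List Char → List Char
  | [] => []
  | c :: t =>
    match hf : pvTableB.find? (fun pr => pr.1.isPrefixOf (c :: t)) with
    | some pr => pr.2 ++ pvScanGo ((c :: t).drop pr.1.length)
    | none => c :: pvScanGo t
termination_by s => s.length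
decreasing_by
  · have hm := pvTableB_pat_pos _ (List.mem_of_find?_eq_some hf)
    simp only [List.length_drop, List.length_cons]
    omega
  · simp

def replace_links_in_report_alt (report : String) : String :=
  String.ofList (pvScanGo report.toList)

-- ===== PRECONDITION & SPEC =====
def Spec_replace_links_in_report (report : String) (out : String) : Prop := out = replace_links_in_report_alt report
instance (report : String) (out : String) : Decidable (Spec_replace_links_in_report report out) := by unfold Spec_replace_links_in_report; infer_instance

-- ===== CLAIM (what is proved, stated in full; the proofs are below) =====
def Claim_equal_replace_links_in_report : Prop := ∀ (report : String), Dom_replace_links_in_report report → Spec_replace_links_in_report report (replace_links_in_report report)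

-- ===== LEMMAS AND PROOFS =====

-- structural characterisation of Python's str.replace (for a nonempty pattern)
def pvRepl (p r : List Char) : List Char → List Char
  | [] => []
  | c :: t =>
    if p.isPrefixOf (c :: t) then r ++ pvRepl p r (t.drop (p.length - 1))
    else c :: pvRepl p r t
termination_by l => l.length
decreasing_by
  · simp only [List.length_drop, List.length_cons]; omega
  · simp

theorem pvRepl_nil (p r : List Char) : pvRepl p r [] = [] := by rw [pvRepl]

theorem pvRepl_cons (p r : List Char) (c : Char) (t : List Char) :
    pvRepl p r (c :: t) =
      if p.isPrefixOf (c :: t) then r ++ pvRepl p r (t.drop (p.length - 1))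
      else c :: pvRepl p r t := by
  rw [pvRepl]

theorem pv_go_eq (old new : List Char) (hold : old ≠ []) :
    ∀ (fuel : Nat) (l acc : List Char), l.length ≤ fuel →
      PySem.Chars.replace.go old new fuel l acc = acc.reverse ++ pvRepl old new l := by
  intro fuel
  induction fuel with
  | zero =>
    intro l acc hl
    have : l = [] := by cases l <;> simp_all
    subst this
    simp [PySem.Chars.replace.go, pvRepl_nil]
  | succ n ih =>
    intro l acc hl
    cases l with
    | nil => simp [PySem.Chars.replace.go, pvRepl_nil]
    | cons c t =>
      obtain ⟨o, ot, rfl⟩ : ∃ o ot, old = o :: ot := by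
        cases old with
        | nil => exact absurd rfl hold
        | cons o ot => exact ⟨o, ot, rfl⟩
      by_cases hp : (o :: ot).isPrefixOf (c :: t) = true
      · have hdrop : List.drop (o :: ot).length (c :: t) = t.drop ((o :: ot).length - 1) := by
          simp [List.drop_succ_cons]
        have hlen : (t.drop ((o :: ot).length - 1)).length ≤ n := by
          simp only [List.length_drop]
          simp only [List.length_cons] at hl
          omega
        rw [pvRepl_cons, if_pos hp]
        simp only [PySem.Chars.replace.go]
        rw [if_pos hp, hdrop, ih _ _ hlen]
        simp
      · have hp' : (o :: ot).isPrefixOf (c :: t) = false := by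
          revert hp; cases ((o :: ot).isPrefixOf (c :: t)) <;> simp
        rw [pvRepl_cons, if_neg (by simp [hp'])]
        simp only [PySem.Chars.replace.go]
        rw [if_neg (by simp [hp']), ih t (c :: acc) (by simp only [List.length_cons] at hl; omega)]
        simp

theorem pv_replace_eq (s old new : List Char) (hold : old ≠ []) :
    PySem.Chars.replace s old new = pvRepl old new s := by
  unfold PySem.Chars.replace
  rw [if_neg (by simp [hold]), pv_go_eq old new hold s.length s [] le_rfl]
  simp

-- no '.' immediately followed by '/' anywhere
def pvNds : List Char → Bool
  | [] => true
  | a :: t => !(a == '.' && t.head? == some '/') && pvNds t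

-- the disjointness facts about one table entry that the whole proof runs on:
-- pattern starts with 'h', no other 'h' in pattern or replacement,
-- replacement starts "./", pattern tail has no "./" and does not end in '.'
def pvGood (p r : List Char) : Prop :=
  p.head? = some 'h' ∧ 'h' ∉ p.tail ∧ 'h' ∉ r ∧ r.take 2 = ['.', '/'] ∧
    pvNds p.tail = true ∧ p.tail.getLast? ≠ some '.'

def pvGoodT (tbl : List (List Char × List Char)) : Prop := ∀ pr ∈ tbl, pvGood pr.1 pr.2

theorem pvTableB_good : pvGoodT pvTableB := by unfold pvGoodT pvGood; decide

theorem pv_shape {p : List Char} (h : p.head? = some 'h') : p = 'h' :: p.tail := by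
  cases p <;> simp_all

theorem pv_rshape {r : List Char} (h : r.take 2 = ['.', '/']) :
    ∃ r', r = '.' :: '/' :: r' := by
  cases r with
  | nil => simp at h
  | cons a t =>
    cases t with
    | nil => simp at h
    | cons b t' =>
      simp only [List.take_succ_cons, List.take_zero] at h
      obtain ⟨h1, h2⟩ := by simpa using h
      exact ⟨t', by simp [h1, h2]⟩

theorem pv_not_prefix_head {p : List Char} (hp : p.head? = some 'h') {c : Char}
    (hc : c ≠ 'h') (w : List Char) : ¬ p <+: (c :: w) := by
  rw [pv_shape hp]
  intro h
  rw [List.cons_prefix_cons] at h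
  exact hc h.1.symm

theorem pvRepl_append_free (p r : List Char) (hp : p.head? = some 'h') :
    ∀ (u v : List Char), 'h' ∉ u → pvRepl p r (u ++ v) = u ++ pvRepl p r v := by
  intro u
  induction u with
  | nil => simp
  | cons c u' ih =>
    intro v hu
    have hc : c ≠ 'h' := by intro h; exact hu (by simp [h])
    rw [List.cons_append, pvRepl_cons,
      if_neg (by simpa [List.isPrefixOf_iff_prefix] using pv_not_prefix_head hp hc (u' ++ v))]
    rw [ih v (by intro h; exact hu (by simp [h]))]
    simp

theorem pvNds_tail {a : Char} {t : List Char} (h : pvNds (a :: t) = true) : pvNds t = true := by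
  simp only [pvNds, Bool.and_eq_true] at h
  exact h.2

theorem pvRepl_not_prefix (p r : List Char) (_hp : p.head? = some 'h')
    (hr : r.take 2 = ['.', '/']) :
    ∀ (t q : List Char), pvNds q = true → q.getLast? ≠ some '.' → ¬ q <+: t →
      ¬ q <+: pvRepl p r t := by
  intro t
  induction t with
  | nil =>
    intro q _ _ hq
    rw [pvRepl_nil]
    intro h
    exact hq (by simp [List.prefix_nil.mp h])
  | cons c t' ih =>
    intro q hnds hlast hq
    rw [pvRepl_cons]
    split
    · -- a replacement is emitted here: q would have to start "./", excluded
      obtain ⟨r', hr'⟩ := pv_rshape hr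
      subst hr'
      intro hpre
      cases q with
      | nil => exact hq List.nil_prefix
      | cons q0 q1 =>
        rw [List.cons_append, List.cons_prefix_cons] at hpre
        obtain ⟨rfl, hpre1⟩ := hpre
        cases q1 with
        | nil => exact hlast rfl
        | cons q2 q3 =>
          rw [List.cons_append, List.cons_prefix_cons] at hpre1
          obtain ⟨rfl, _⟩ := hpre1
          simp [pvNds] at hnds
    · intro hpre
      cases q with
      | nil => exact hq List.nil_prefix
      | cons q0 q1 =>
        rw [List.cons_prefix_cons] at hpre
        obtain ⟨rfl, hpre1⟩ := hpre
        cases q1 with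
        | nil => exact hq (by simp [List.cons_prefix_cons, List.nil_prefix])
        | cons q2 q3 =>
          have hq1 : ¬ (q2 :: q3) <+: t' := by
            intro h
            exact hq (by simp [List.cons_prefix_cons, h])
          exact ih (q2 :: q3) (pvNds_tail hnds) (by simpa using hlast) hq1 hpre1

theorem pv_prefix_pvRepl_iff (p r : List Char) (hp : p.head? = some 'h')
    (hr : r.take 2 = ['.', '/']) (q : List Char) (hq : 'h' ∉ q)
    (hnds : pvNds q = true) (hlast : q.getLast? ≠ some '.') (t : List Char) :
    q <+: pvRepl p r t ↔ q <+: t := by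
  constructor
  · intro h
    by_contra hc
    exact pvRepl_not_prefix p r hp hr t q hnds hlast hc h
  · rintro ⟨v, rfl⟩
    rw [pvRepl_append_free p r hp q v hq]
    exact List.prefix_append q _

def pvApply (tbl : List (List Char × List Char)) (s : List Char) : List Char :=
  tbl.foldl (fun acc pr => pvRepl pr.1 pr.2 acc) s

theorem pvApply_nil (tbl : List (List Char × List Char)) : pvApply tbl [] = [] := by
  induction tbl with
  | nil => rfl
  | cons pr rest ih => simp only [pvApply, List.foldl_cons, pvRepl_nil] at ih ⊢; exact ih

theorem pvApply_cons_ne (tbl : List (List Char × List Char)) (h : pvGoodT tbl)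
    (c : Char) (hc : c ≠ 'h') : ∀ t, pvApply tbl (c :: t) = c :: pvApply tbl t := by
  induction tbl with
  | nil => intro t; rfl
  | cons pr rest ih =>
    intro t
    have hg := h pr (by simp)
    have hrest : pvGoodT rest := fun x hx => h x (by simp [hx])
    simp only [pvApply, List.foldl_cons]
    rw [pvRepl_cons,
      if_neg (by simpa [List.isPrefixOf_iff_prefix] using pv_not_prefix_head hg.1 hc t)]
    exact ih hrest (pvRepl pr.1 pr.2 t)

theorem pvApply_append_free (tbl : List (List Char × List Char)) (h : pvGoodT tbl)
    (u : List Char) (hu : 'h' ∉ u) : ∀ v, pvApply tbl (u ++ v) = u ++ pvApply tbl v := by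
  induction tbl with
  | nil => intro v; rfl
  | cons pr rest ih =>
    intro v
    have hg := h pr (by simp)
    have hrest : pvGoodT rest := fun x hx => h x (by simp [hx])
    simp only [pvApply, List.foldl_cons]
    rw [pvRepl_append_free pr.1 pr.2 hg.1 u v hu]
    exact ih hrest (pvRepl pr.1 pr.2 v)

theorem pv_find?_congr {α : Type} (f g : α → Bool) :
    ∀ (l : List α), (∀ x ∈ l, f x = g x) → l.find? f = l.find? g := by
  intro l
  induction l with
  | nil => intro _; rfl
  | cons a t ih =>
    intro h
    rw [List.find?_cons, List.find?_cons, h a (by simp)]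
    split
    · rfl
    · exact ih fun x hx => h x (by simp [hx])

theorem pvApply_h_none (tbl : List (List Char × List Char)) (h : pvGoodT tbl) :
    ∀ t, (∀ pr ∈ tbl, ¬ pr.1.tail <+: t) →
      pvApply tbl ('h' :: t) = 'h' :: pvApply tbl t := by
  induction tbl with
  | nil => intro t _; rfl
  | cons pr rest ih =>
    intro t hno
    have hg := h pr (by simp)
    have hrest : pvGoodT rest := fun x hx => h x (by simp [hx])
    simp only [pvApply, List.foldl_cons]
    rw [pvRepl_cons, if_neg]
    · refine ih hrest (pvRepl pr.1 pr.2 t) ?_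
      intro x hx
      have hgx := hrest x hx
      exact pvRepl_not_prefix pr.1 pr.2 hg.1 hg.2.2.2.1 t x.1.tail hgx.2.2.2.2.1
        hgx.2.2.2.2.2 (hno x (by simp [hx]))
    · simp only [List.isPrefixOf_iff_prefix]
      rw [pv_shape hg.1]
      intro hc
      rw [List.cons_prefix_cons] at hc
      exact hno pr (by simp) hc.2

theorem pvApply_h_some (tbl : List (List Char × List Char)) (h : pvGoodT tbl) :
    ∀ (t p r : List Char),
      tbl.find? (fun pr => pr.1.tail.isPrefixOf t) = some (p, r) →
      pvApply tbl ('h' :: t) = r ++ pvApply tbl (t.drop p.tail.length) := by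
  induction tbl with
  | nil => intro t p r hf; simp at hf
  | cons qu rest ih =>
    intro t p r hf
    have hg := h qu (by simp)
    have hrest : pvGoodT rest := fun x hx => h x (by simp [hx])
    by_cases hq : qu.1.tail.isPrefixOf t = true
    · rw [List.find?_cons_of_pos (by simpa using hq)] at hf
      obtain rfl : qu = (p, r) := by simpa using hf
      simp only [pvApply, List.foldl_cons]
      have hpre : (p, r).1 <+: 'h' :: t := by
        rw [pv_shape hg.1, List.cons_prefix_cons]
        exact ⟨rfl, List.isPrefixOf_iff_prefix.mp hq⟩
      rw [pvRepl_cons, if_pos (List.isPrefixOf_iff_prefix.mpr hpre)]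
      have hlen : (p, r).1.length - 1 = (p, r).1.tail.length := by
        rw [pv_shape hg.1]; simp
      rw [hlen]
      exact pvApply_append_free rest hrest (p, r).2 hg.2.2.1 _
    · rw [List.find?_cons_of_neg (by simpa using hq)] at hf
      simp only [pvApply, List.foldl_cons]
      rw [pvRepl_cons, if_neg]
      · -- the head replace passes 'h' through; transfer find? to the rewritten tail
        have hmem := List.mem_of_find?_eq_some hf
        have hgp := hrest (p, r) hmem
        have hptt : p.tail <+: t :=
          List.isPrefixOf_iff_prefix.mp (by simpa using List.find?_some hf)
        have hcongr : rest.find? (fun pr => pr.1.tail.isPrefixOf (pvRepl qu.1 qu.2 t)) =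
            rest.find? (fun pr => pr.1.tail.isPrefixOf t) := by
          refine pv_find?_congr _ _ rest ?_
          intro x hx
          have hgx := hrest x hx
          rw [Bool.eq_iff_iff]
          simp only [List.isPrefixOf_iff_prefix]
          exact pv_prefix_pvRepl_iff qu.1 qu.2 hg.1 hg.2.2.2.1 x.1.tail hgx.2.1
            hgx.2.2.2.2.1 hgx.2.2.2.2.2 t
        have := ih hrest (pvRepl qu.1 qu.2 t) p r (by rw [hcongr]; exact hf)
        simp only [pvApply] at this
        rw [this]
        obtain ⟨v, rfl⟩ := hptt
        rw [pvRepl_append_free qu.1 qu.2 hg.1 p.tail v hgp.2.1,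
          List.drop_left, List.drop_left]
      · simp only [List.isPrefixOf_iff_prefix]
        rw [pv_shape hg.1]
        intro hc
        rw [List.cons_prefix_cons] at hc
        exact hq (List.isPrefixOf_iff_prefix.mpr hc.2)

theorem pvScanGo_cons (c : Char) (t : List Char) :
    pvScanGo (c :: t) =
      match pvTableB.find? (fun pr => pr.1.isPrefixOf (c :: t)) with
      | some pr => pr.2 ++ pvScanGo ((c :: t).drop pr.1.length)
      | none => c :: pvScanGo t := by
  rw [pvScanGo]
  split
  · next pr heq => rw [heq]
  · next heq => rw [heq]

theorem pv_main : ∀ (n : Nat) (s : List Char), s.length ≤ n →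
    pvApply pvTableB s = pvScanGo s := by
  intro n
  induction n with
  | zero =>
    intro s hs
    have : s = [] := by cases s <;> simp_all
    subst this
    rw [pvApply_nil, pvScanGo]
  | succ n ih =>
    intro s hs
    cases s with
    | nil => rw [pvApply_nil, pvScanGo]
    | cons c t =>
      simp only [List.length_cons] at hs
      rw [pvScanGo_cons]
      by_cases hc : c = 'h'
      · subst hc
        have hcongr : pvTableB.find? (fun pr => pr.1.isPrefixOf ('h' :: t)) =
            pvTableB.find? (fun pr => pr.1.tail.isPrefixOf t) := by
          refine pv_find?_congr _ _ pvTableB ?_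
          intro x hx
          have hgx := pvTableB_good x hx
          rw [Bool.eq_iff_iff]
          simp only [List.isPrefixOf_iff_prefix]
          rw [pv_shape hgx.1, List.cons_prefix_cons]
          simp
        rw [hcongr]
        cases hfind : pvTableB.find? (fun pr => pr.1.tail.isPrefixOf t) with
        | none =>
          have hno : ∀ pr ∈ pvTableB, ¬ pr.1.tail <+: t := by
            intro x hx
            have := List.find?_eq_none.mp hfind x hx
            simpa [List.isPrefixOf_iff_prefix] using this
          rw [pvApply_h_none pvTableB pvTableB_good t hno, ih t (by omega)]
        | some pr =>
          obtain ⟨p, r⟩ := pr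
          rw [pvApply_h_some pvTableB pvTableB_good t p r hfind]
          have hgp := pvTableB_good (p, r) (List.mem_of_find?_eq_some hfind)
          show r ++ pvApply pvTableB (List.drop p.tail.length t) =
            r ++ pvScanGo (List.drop p.length ('h' :: t))
          have hdrop : List.drop p.length ('h' :: t) = List.drop p.tail.length t := by
            obtain ⟨pt, hpt⟩ : ∃ pt, p = 'h' :: pt := ⟨p.tail, pv_shape hgp.1⟩
            rw [hpt]
            simp [List.drop_succ_cons]
          rw [hdrop, ih (t.drop p.tail.length) (by simp only [List.length_drop]; omega)]
      · have hnone : pvTableB.find? (fun pr => pr.1.isPrefixOf (c :: t)) = none := by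
          apply List.find?_eq_none.mpr
          intro x hx
          have hgx := pvTableB_good x hx
          simpa [List.isPrefixOf_iff_prefix] using pv_not_prefix_head hgx.1 hc t
        rw [hnone, pvApply_cons_ne pvTableB pvTableB_good c hc t, ih t (by omega)]

theorem pv_strfold (tbl : List (String × String)) :
    ∀ (s : List Char),
      tbl.foldl (fun acc pr => PySem.Str.replace acc pr.1 pr.2) (String.ofList s) =
        String.ofList
          (tbl.foldl (fun l pr => PySem.Chars.replace l pr.1.toList pr.2.toList) s) := by
  induction tbl with
  | nil => intro s; rfl
  | cons pr rest ih =>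
    intro s
    simp only [List.foldl_cons]
    have : PySem.Str.replace (String.ofList s) pr.1 pr.2 =
        String.ofList (PySem.Chars.replace s pr.1.toList pr.2.toList) := by
      unfold PySem.Str.replace
      rw [String.toList_ofList]
    rw [this, ih]

theorem pv_charfold (tbl : List (String × String))
    (h : ∀ pr ∈ tbl, pr.1.toList ≠ []) :
    ∀ (s : List Char),
      tbl.foldl (fun l pr => PySem.Chars.replace l pr.1.toList pr.2.toList) s =
        pvApply (tbl.map (fun pr => (pr.1.toList, pr.2.toList))) s := by
  induction tbl with
  | nil => intro s; rfl
  | cons pr rest ih =>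
    intro s
    simp only [List.foldl_cons, List.map_cons, pvApply]
    rw [pv_replace_eq s pr.1.toList pr.2.toList (h pr (by simp))]
    exact ih (fun x hx => h x (by simp [hx])) (pvRepl pr.1.toList pr.2.toList s)

theorem pvLinks_ne_nil : ∀ pr ∈ pvLinks, pr.1.toList ≠ [] := by decide

-- ===== VERDICT (by name: the statement is the Claim_ definition above) =====
theorem replace_links_in_report_spec : Claim_equal_replace_links_in_report := by
  intro report _
  unfold Spec_replace_links_in_report replace_links_in_report replace_links_in_report_alt
  conv_lhs => rw [show report = String.ofList report.toList from (String.ofList_toList).symm]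
  rw [pv_strfold pvLinks report.toList,
    pv_charfold pvLinks pvLinks_ne_nil report.toList]
  rw [show pvLinks.map (fun pr => (pr.1.toList, pr.2.toList)) = pvTableB from rfl]
  rw [pv_main report.toList.length report.toList le_rfl]
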